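-- pv_equiv track=rewrite | github.com/VuNghiXuan/code_python_basic | Basic/docso_codePython.py | themTienTo_Lop
-- ===== SOURCE A (Python) =====
-- Lop = ['tỷ', 'triệu', 'nghìn']
--
-- def themTienTo_Lop(list_Cum3So):
--     so_label = len(list_Cum3So)
--     # so_label = tongso_cum - 1 # tính số nhãn tiền tố (trừ lớp đầu tiên không gán nhãn)
--
--     soLop = len(Lop)
--     list_TienTo = []
--     if so_label==1: # Trường hợp <1000, ko thêm tiền tố
--         return list_TienTo, list_Cum3So
--     elif so_label>1 and so_label <= soLop: # Trường hợp <1tỷ, ko thêm tiền tố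
--         list_TienTo = [*Lop[-so_label+1:]]
--     else: #Trường hợp >1tỷ
--         "Nguyên tắc thêm vào ptử cuối của list";
--         id_Lop =-1 # id_Lop = [-3,-2,-1]
--         sochu_ty = 0
--         for i_label in range(so_label):
--             if id_Lop < (-soLop):
--                 id_Lop =-1 # Nếu vượt qua soLop thì gám lại =-1
--
--                 # thêm vào vị trí đầu tiên
--                 list_TienTo.insert(0, Lop[id_Lop])
--
--                 # tăng id_Lop
--                 id_Lop -= 1
--
--             elif i_label !=0:
--                 # thêm vào vị trí đầu tiên
--                 list_TienTo.insert(0, Lop[id_Lop])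
--
--                 # Giảm id_Lop
--                 id_Lop -= 1
--
--                 # Thêm chữ tỷ:
--                 if list_TienTo[0] == Lop[0]: # Lop[0] = "tỷ"
--                     list_TienTo[0] += (" "+Lop[0])*sochu_ty
--                     sochu_ty += 1
--     return list_TienTo, list_Cum3So
-- ===== SOURCE B (Python) =====
-- def themTienTo_Lop(list_Cum3So):
--     n = len(list_Cum3So)
--     labels = []
--     for k in range(n - 1, 0, -1):
--         r = k % 3
--         if r == 1:
--             labels.append('nghìn')
--         elif r == 2:
--             labels.append('triệu')
--         else:
--             labels.append(" ".join(['tỷ'] * (k // 3)))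
--     return labels, list_Cum3So
-- ===== Notes on version B (the rewrite author's own statement) =====
-- stated objective: simpler
-- what changed: Replaced A's stateful counter machine (descending id_Lop register that wraps past the Lop table plus a running so-chu-ty counter feeding string doubling) by a direct per-position formula: label k is chosen by k % 3, with the 'ty'-group repeated k // 3 times, emitted in one descending loop with no special cases for short inputs.
import Mathlib
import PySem

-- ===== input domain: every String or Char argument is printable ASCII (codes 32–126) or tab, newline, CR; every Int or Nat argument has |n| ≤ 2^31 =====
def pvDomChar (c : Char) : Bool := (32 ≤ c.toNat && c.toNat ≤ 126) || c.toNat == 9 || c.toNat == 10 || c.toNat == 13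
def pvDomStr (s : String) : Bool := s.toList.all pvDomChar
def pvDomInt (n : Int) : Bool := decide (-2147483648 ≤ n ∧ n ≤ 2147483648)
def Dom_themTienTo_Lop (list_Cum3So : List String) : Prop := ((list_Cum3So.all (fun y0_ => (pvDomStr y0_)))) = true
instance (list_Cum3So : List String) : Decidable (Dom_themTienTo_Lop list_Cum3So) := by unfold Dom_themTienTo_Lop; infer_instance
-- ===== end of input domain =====

-- B replaces A's stateful counter machine (descending index register + 'tỷ' counter)
-- by a direct per-position formula k % 3 / k // 3; objective: simpler.

-- ===== PORT A =====

-- module constant Lop (the Vietnamese strings are NFD-decomposed exactly as in the source)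
def Lop : List String := ["tỷ", "triệu", "nghìn"]

-- hand port of Python string repetition s * n (exact for every Int n: n ≤ 0 gives "")
def pyStrMul (s : String) (n : Int) : String :=
  PySem.Str.join "" (PySem.List.pyRepeat [s] n)

-- loop body of A's else-branch, state = (id_Lop, sochu_ty, list_TienTo)
def themTienTo_LopBody (soLop : Int) (st : Int × Int × List String) (i_label : Int) :
    Int × Int × List String :=
  let id_Lop := st.1
  let sochu_ty := st.2.1
  let list_TienTo := st.2.2
  if id_Lop < -soLop then
    -- id_Lop = -1; insert Lop[id_Lop] at 0; id_Lop -= 1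
    let id1 : Int := -1
    let acc1 := PySem.List.insert list_TienTo 0 ((PySem.List.pyGet? Lop id1).getD "")
    (id1 - 1, sochu_ty, acc1)
  else if i_label ≠ 0 then
    let acc1 := PySem.List.insert list_TienTo 0 ((PySem.List.pyGet? Lop id_Lop).getD "")
    let id1 := id_Lop - 1
    -- if list_TienTo[0] == Lop[0]: list_TienTo[0] += (" "+Lop[0])*sochu_ty; sochu_ty += 1
    if (PySem.List.pyGet? acc1 0).getD "" = (PySem.List.pyGet? Lop 0).getD "" then
      let h := (PySem.List.pyGet? acc1 0).getD ""
      (id1, sochu_ty + 1, acc1.set 0 (h ++ pyStrMul (" " ++ (PySem.List.pyGet? Lop 0).getD "") sochu_ty))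
    else
      (id1, sochu_ty, acc1)
  else
    (id_Lop, sochu_ty, list_TienTo)

def themTienTo_Lop (list_Cum3So : List String) : List String × List String :=
  let so_label : Int := list_Cum3So.length
  let soLop : Int := Lop.length
  let list_TienTo : List String := []
  if so_label = 1 then
    (list_TienTo, list_Cum3So)
  else if so_label > 1 ∧ so_label ≤ soLop then
    (PySem.List.slice Lop (some (-so_label + 1)) none, list_Cum3So)
  else
    let fin := (PySem.List.pyRange 0 so_label 1).foldl (themTienTo_LopBody soLop) (-1, 0, list_TienTo)
    (fin.2.2, list_Cum3So)

-- ===== PORT B =====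

-- per-position label, B's loop body formula
def labelOf (k : Int) : String :=
  let r := PySem.Int.mod k 3
  if r = 1 then "nghìn"
  else if r = 2 then "triệu"
  else PySem.Str.join " " (PySem.List.pyRepeat ["tỷ"] (PySem.Int.floordiv k 3))

def themTienTo_Lop_alt (list_Cum3So : List String) : List String × List String :=
  let n : Int := list_Cum3So.length
  let labels := (PySem.List.pyRange (n - 1) 0 (-1)).foldl
    (fun labels k => labels ++ [labelOf k]) []
  (labels, list_Cum3So)

-- ===== PRECONDITION & SPEC =====
def Spec_themTienTo_Lop (list_Cum3So : List String) (out : List String × List String) : Prop := out = themTienTo_Lop_alt list_Cum3So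
instance (list_Cum3So : List String) (out : List String × List String) : Decidable (Spec_themTienTo_Lop list_Cum3So out) := by unfold Spec_themTienTo_Lop; infer_instance

-- ===== CLAIM (what is proved, stated in full; the proofs are below) =====
def Claim_equal_themTienTo_Lop : Prop := ∀ (list_Cum3So : List String), Dom_themTienTo_Lop list_Cum3So → Spec_themTienTo_Lop list_Cum3So (themTienTo_Lop list_Cum3So)

-- ===== LEMMAS AND PROOFS =====

-- the labels, Nat-indexed
def lab (k : Nat) : String :=
  if k % 3 = 1 then "nghìn"
  else if k % 3 = 2 then "triệu"
  else PySem.Str.join " " (List.replicate (k / 3) "tỷ")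

-- [lab j, lab (j-1), ..., lab 1]
def downFrom : Nat → List String
  | 0 => []
  | j + 1 => lab (j + 1) :: downFrom j

theorem lab_int (k : Nat) : labelOf (k : Int) = lab k := by
  have h1 : PySem.Int.mod (k : Int) 3 = ((k % 3 : Nat) : Int) := by
    rw [PySem.Int.mod_eq_emod_of_pos (by norm_num)]; omega
  have h2 : (PySem.Int.floordiv (k : Int) 3).toNat = k / 3 := by
    rw [PySem.Int.floordiv_eq_ediv_of_pos (by norm_num)]; omega
  simp only [labelOf, lab, h1, PySem.List.pyRepeat_singleton, h2]
  rcases (show k % 3 = 0 ∨ k % 3 = 1 ∨ k % 3 = 2 by omega) with h | h | h <;>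
    simp [h]

theorem foldl_push {α β : Type} (g : α → β) (l : List α) (init : List β) :
    l.foldl (fun a x => a ++ [g x]) init = init ++ l.map g := by
  induction l generalizing init with
  | nil => simp
  | cons x xs ih => simp [List.foldl, ih]

theorem map_pyRange_down (j : Nat) :
    (PySem.List.pyRange (j : Int) 0 (-1)).map labelOf = downFrom j := by
  induction j with
  | zero => rw [PySem.List.pyRange_neg_one_eq_nil (by norm_num)]; rfl
  | succ n ih =>
    rw [PySem.List.pyRange_neg_one_cons (by positivity)]
    have h : ((n + 1 : Nat) : Int) - 1 = (n : Int) := by push_cast; ring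
    rw [List.map_cons, h, ih, lab_int]
    rfl

theorem B_eq (xs : List String) :
    themTienTo_Lop_alt xs = (downFrom (xs.length - 1), xs) := by
  simp only [themTienTo_Lop_alt]
  rw [foldl_push, List.nil_append]
  cases h : xs.length with
  | zero =>
    rw [show ((0 : Nat) : Int) - 1 = (-1 : Int) by norm_num,
      PySem.List.pyRange_neg_one_eq_nil (by norm_num)]
    rfl
  | succ n =>
    rw [show ((n + 1 : Nat) : Int) - 1 = (n : Int) by push_cast; ring,
      map_pyRange_down]
    rfl

theorem join_empty_sep (l : List (List Char)) :
    PySem.Chars.join [] l = l.flatten := by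
  induction l with
  | nil => simp [PySem.Chars.join_nil]
  | cons x rest ih =>
    cases rest with
    | nil => simp [PySem.Chars.join_singleton]
    | cons y t => rw [PySem.Chars.join_cons_cons, ih]; simp

theorem joinTyChars (q : Nat) :
    PySem.Chars.join (" " : String).toList
        ((List.replicate (q + 1) ("tỷ" : String)).map String.toList) =
      ("tỷ" : String).toList ++
        ((List.replicate q ((" " ++ "tỷ" : String))).map String.toList).flatten := by
  induction q with
  | zero => simp [PySem.Chars.join_singleton]
  | succ m ih =>
    rw [show List.replicate (m + 1 + 1) ("tỷ" : String)
          = "tỷ" :: List.replicate (m + 1) ("tỷ" : String) from List.replicate_succ ..,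
      show List.replicate (m + 1) ("tỷ" : String)
          = "tỷ" :: List.replicate m ("tỷ" : String) from List.replicate_succ ..,
      List.map_cons, List.map_cons, PySem.Chars.join_cons_cons, ← List.map_cons,
      show ("tỷ" : String) :: List.replicate m ("tỷ" : String)
          = List.replicate (m + 1) ("tỷ" : String) from (List.replicate_succ ..).symm,
      ih,
      show List.replicate (m + 1) ((" " ++ "tỷ" : String))
          = (" " ++ "tỷ") :: List.replicate m ((" " ++ "tỷ" : String)) from List.replicate_succ ..,
      List.map_cons, List.flatten_cons, String.toList_append]
    simp

theorem joinTy (q : Nat) :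
    PySem.Str.join " " (List.replicate (q + 1) ("tỷ" : String)) =
      "tỷ" ++ pyStrMul (" " ++ "tỷ") (q : Int) := by
  apply String.toList_inj.mp
  rw [String.toList_append]
  unfold pyStrMul
  rw [PySem.Str.toList_join, PySem.Str.toList_join,
    show (("" : String)).toList = ([] : List Char) from rfl, join_empty_sep,
    PySem.List.pyRepeat_singleton, show ((q : Int)).toNat = q by omega, joinTyChars]

theorem loop_invariant (j : Nat) (hj : 1 ≤ j) :
    (PySem.List.pyRange 0 (j : Int) 1).foldl (themTienTo_LopBody 3) (-1, 0, []) =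
      ((if j = 1 then -1 else if (j - 1) % 3 = 0 then -4
        else if (j - 1) % 3 = 1 then -2 else -3 : Int),
       (((j - 1) / 3 : Nat) : Int), downFrom (j - 1)) := by
  induction j with
  | zero => omega
  | succ n ih =>
    rcases Nat.eq_or_lt_of_le hj with h1 | h1
    · have h0 : n = 0 := by omega
      subst h0
      decide
    · have hn : 1 ≤ n := by omega
      rw [show ((n + 1 : Nat) : Int) = (n : Int) + 1 by push_cast; ring,
        PySem.List.pyRange_one_succ_right (by positivity), List.foldl_append, ih hn]
      simp only [List.foldl]
      obtain ⟨m, rfl⟩ : ∃ m, n = m + 1 := ⟨n - 1, by omega⟩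
      rcases (show m = 0 ∨ (1 ≤ m ∧ m % 3 = 0) ∨ m % 3 = 1 ∨ m % 3 = 2 by omega)
        with h | ⟨h2, h3⟩ | h | h
      · subst h
        decide
      · -- id = -4 : reset branch, label 'nghìn'
        have h4 : (m + 1) % 3 = 1 := by omega
        have h5 : (m + 1) / 3 = m / 3 := by omega
        have hm1 : ¬ (m = 0) := by omega
        simp [themTienTo_LopBody, PySem.List.insert_zero, downFrom, lab,
          PySem.List.pyGet?, PySem.List.pyIdx?, Lop, h3, h4, h5, hm1]
      · -- id = -2 : insert 'triệu'
        have h4 : (m + 1) % 3 = 2 := by omega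
        have h5 : (m + 1) / 3 = m / 3 := by omega
        have hm1 : ¬ (m = 0) := by omega
        have hz : ¬ ((m : Int) + 1 = 0) := by omega
        have hne : ("triệu" : String) ≠ "tỷ" := by decide
        simp [themTienTo_LopBody, PySem.List.insert_zero, downFrom, lab,
          PySem.List.pyGet?, PySem.List.pyIdx?, Lop, h, h4, h5, hm1, hz, hne]
      · -- id = -3 : insert 'tỷ', repetition branch
        have h4 : (m + 1) % 3 = 0 := by omega
        have h5 : (m + 1) / 3 = m / 3 + 1 := by omega
        have hm1 : ¬ (m = 0) := by omega
        have hz : ¬ ((m : Int) + 1 = 0) := by omega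
        have hj : PySem.Str.join " " (List.replicate (m / 3 + 1) ("tỷ" : String)) =
            "tỷ" ++ pyStrMul (" " ++ "tỷ") ((m / 3 : Nat) : Int) := joinTy (m / 3)
        simp [themTienTo_LopBody, PySem.List.insert_zero, downFrom, lab,
          PySem.List.pyGet?, PySem.List.pyIdx?, Lop, h, h4, h5, hm1, hz, hj]

theorem A_eq (xs : List String) :
    themTienTo_Lop xs = (downFrom (xs.length - 1), xs) := by
  match xs with
  | [] => rfl
  | [a] => rfl
  | [a, b] => rfl
  | [a, b, c] => rfl
  | a :: b :: c :: d :: t =>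
    simp only [themTienTo_Lop, List.length_cons]
    rw [show ((Lop.length : Int)) = 3 from rfl]
    rw [if_neg (by omega), if_neg (by push_cast; omega)]
    rw [show ((t.length + 1 + 1 + 1 + 1 : Nat) : Int) = ((t.length + 4 : Nat) : Int) by push_cast; ring]
    rw [loop_invariant (t.length + 4) (by omega)]

-- ===== VERDICT (by name: the statement is the Claim_ definition above) =====
theorem themTienTo_Lop_spec : Claim_equal_themTienTo_Lop := by
  intro xs _
  unfold Spec_themTienTo_Lop
  rw [A_eq, B_eq]
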